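/- GENERATED by tools/from_farm_form.py from prooffarm-gif/accepted/DGifBufferedInput.2/Lemmas.lean (a worked proof of the farm's unit `DGifBufferedInput.2`,
   accepted by the verdict) — do not edit. -/
import Gif.Spec.Units.DGifBufferedInput_2
import Gif.Spec.AllSegs

/-!
  Lemmas for the unit `DGifBufferedInput.2` (0x1065a8 … 0x1065fe, dgif_lib.c:1123-1134; NO protected frame): the segment is walked
  in TWO STEPS that meet at the return address of `InternalRead(gif, Buf, 1)`, 0x1065b8 (`ret5`), with a private assertion there.

      bi2_env_at_call   `Env` at a callee's entry from `Frame.inv` / `Frame.ok` (`Env.at_call` of FrameCarry.lean for a function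
                        WITHOUT a protected frame: the frame list stays `frames`)
      bi2_AtRet5        the assertion at `ret5`: `Body` + the count in `eax` + what a full read means for the reader
      bi2_seg_call      0x1065a8 … the call of InternalRead … 0x1065b8: `Refill` → `bi2_AtRet5`
      bi2_seg_tail      0x1065b8 … 0x10659d (two error arms) / 0x1065fe: `bi2_AtRet5` → `Done ∨ AfterLen`
-/

open X86 X86.User Asan ProgX.Base ProgX.Base.Spec Gif.Spec

set_option maxRecDepth 4000
set_option maxHeartbeats 4000000

namespace Gif.Spec.DGifBufferedInput_2

/-- **`Env` AT THE ENTRY OF A CALLEE of a function without a protected frame**: the frame list is the entry's. `henv` is the ENTRY's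
environment, `hinv` / `hok` the body's invariants at a memory `mem` (`Frame.inv`, `Frame.ok`: `top` = the body's stack pointer), and
the callee's entry state `s` differs from `mem` by stack stores below `top` (the pushed return address). -/
theorem bi2_env_at_call {H : Heap} {rest : List Obj} {frames : List (Nat × FrameLayout)} {F : Forest} {R : Rd} {e s : State}
    {top lo : Nat} {mem : Mem} (henv : Env H rest frames F R e)
    (hinv : HeapInv H rest frames top mem) (hok : GifOK H F R mem)
    (hs : Mem.SameExcept [⟨lo, top⟩] mem s.mem) (hlo : 0x700000 ≤ lo) (htop : top ≤ (e.reg .rsp).toNat + 8)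
    (hsp : (s.reg .rsp).toNat + 8 ≤ top) (h8 : (s.reg .rsp).toNat % 8 = 0) (hlo' : 0x700000 ≤ (s.reg .rsp).toNat + 8) :
    Env H rest frames F R s := by
  have hcur := henv.ctx.cursor_range henv.heap.inv.shadow
  have hhi := hinv.shadow.stack.hi
  have hoff := hinv.heap.offStack
  have hroom := hinv.heap.room
  have hun : ShadowUntouched mem s.mem := by
    apply hs.eqOn
    intro w hw
    have e := List.mem_singleton.mp hw
    rw [e]
    simp only
    omega
  have hinv' : HeapInv H rest frames ((s.reg .rsp).toNat + 8) s.mem := by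
    refine (hinv.sameExcept hun hs ?_).lower hsp (by omega) hlo'
    intro w hw
    have e := List.mem_singleton.mp hw
    rw [e]
    left
    simp only
    omega
  refine ⟨⟨hinv', henv.heap.base, henv.heap.limit, henv.heap.text, henv.heap.offText⟩, henv.ctx, ?_⟩
  apply hok.sameExcept hinv.heap ⟨hcur.1, hcur.2.1⟩ hs
  intro w hw
  have e := List.mem_singleton.mp hw
  rw [e]
  apply Loose.stack hinv.heap
  · simp only
    omega
  · simp only
    omega
  · simp only
    omega

/-- **At 1065B8H (ret5), `InternalRead(gif, Buf, 1)` has returned**: `Body`, `eax = k ≤ 1` the bytes delivered (zero-extended), and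
`k = 1` means the reader advanced by exactly 1. -/
structure bi2_AtRet5 (H : Heap) (rest : List Obj) (frames : List (Nat × FrameLayout)) (F : Forest) (R : Rd) (u₀ e : State)
    (ret : Word) (v : State) : Prop where
  body : DGifBufferedInput.Body Gif.L.DGifBufferedInput.ret5 H rest frames F R u₀ e ret v
  count : (v.reg .rax).toNat ≤ 1
  adv : (v.reg .rax).toNat = 1 → rem R v.mem + 1 = rem R e.mem

/-- **1065A8H … the call of InternalRead … 1065B8H (ret5)** (dgif_lib.c:1123 `InternalRead(GifFile, Buf, 1)`): `edx = 1`,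
`rsi = rbx = Buf = pv + 88`, `rdi = r13 = gif`. The buffer is `pv.Buf[0]`: `bufLive`, the `pv` case of `Loose`. -/
theorem bi2_seg_call (Lay : Layout) (hLay : Lay.hi = 0x1000000) (μ : Microarch) (hμ : UserX.MicroOK μ) (u₀ : State)
    (hcode : HasCodeNat Lay u₀ Gif.L.DGifBufferedInput.entry Gif.Code.code_DGifBufferedInput.nat Gif.L.DGifBufferedInput.size)
    (H : Heap) (rest : List Obj) (frames : List (Nat × FrameLayout)) (F : Forest) (R : Rd) (e : State) (ret : Word)
    (h_InternalRead : Calls Lay μ ProgX.Base.WayInv (ProgX.Base.conv u₀) Gif.L.InternalRead.entry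
      (Gif.Spec.InternalRead.spec H rest frames F R 1))
    (v : State) (hat : DGifBufferedInput.Refill H rest frames F R u₀ e ret v) :
    ReachVia Lay μ ProgX.Base.WayInv v (bi2_AtRet5 H rest frames F R u₀ e ret) := by
  -- THE PRELUDE: the entry assertion `Refill` = `Body` + the reader is where it was
  obtain ⟨hbody, hrem_eq⟩ := hat
  obtain ⟨hfr, c_r13, c_rbx, c_r12⟩ := hbody
  have he := hfr.entry
  v_entry he
  obtain ⟨henv, hrdi, hrsi, hout⟩ := hfr.pre
  have w_rip := hfr.rip
  have c_rsp : v.reg .rsp = e.reg .rsp - 40 := hfr.rsp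
  have w_kept : RegsKept [.rsp] v v := RegsKept.refl _ _
  have w_eq : Mem.EqOn ProgX.Base.L.textLo ProgX.Base.L.textHi u₀.mem v.mem := ProgX.Base.conv_code_eqOn hfr.code
  have hdf := (show abiInv _ from hfr.abi).1
  have hmx := (show abiInv _ from hfr.abi).2
  have hsse := ProgX.Base.sseOK_of_abiInv hfr.abi
  -- the slots and the footprint that `Frame` at the exit states again
  have k_r14 : v.mem.readLE (e.reg .rsp - 8) 8 = (e.reg .r14).toNat := hfr.slot_r14
  have k_r13 : v.mem.readLE (e.reg .rsp - 16) 8 = (e.reg .r13).toNat := hfr.slot_r13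
  have k_r12 : v.mem.readLE (e.reg .rsp - 24) 8 = (e.reg .r12).toNat := hfr.slot_r12
  have k_rbp : v.mem.readLE (e.reg .rsp - 32) 8 = (e.reg .rbp).toNat := hfr.slot_rbp
  have k_rbx : v.mem.readLE (e.reg .rsp - 40) 8 = (e.reg .rbx).toNat := hfr.slot_rbx
  have k_ra : UInt64.ofNat (v.mem.readLE (e.reg .rsp) 8) = ret := hfr.slot_ra
  have hsame : Mem.SameExcept
    [⟨(e.reg .rsp).toNat - 224, (e.reg .rsp).toNat⟩,
     ⟨F.pv + 88, F.pv + 344⟩,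
     ⟨(e.reg .rdx).toNat, (e.reg .rdx).toNat + 1⟩,
     ⟨F.gif + 96, F.gif + 100⟩,
     ⟨R.cur, R.cur + 8⟩] e.mem v.mem := hfr.same
  -- where the cursor, gif and pv are, as numbers
  have hcur := henv.ctx.cursor_range henv.heap.inv.shadow
  have hgin := henv.ok.owns.inside henv.heap.inv.heap (o := (F.gif, 120)) List.mem_cons_self
  have hpin := henv.ok.owns.inside henv.heap.inv.heap (o := (F.pv, 24936)) (List.mem_cons_of_mem _ List.mem_cons_self)
  have hbase := henv.heap.base
  simp only at hgin hpin
  rw [hbase] at hgin hpin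
  have hg1 := hgin.1
  have hg2 := hgin.2.2.2.2
  have hp1 := hpin.1
  have hp2 := hpin.2.2.2.2
  clear hgin hpin
  -- THE WALK, to the call's return address
  u_walk hcode [hμ.vendor] until [Gif.L.DGifBufferedInput.ret5] span [ProgX.Base.L.textLo, ProgX.Base.L.textHi] side (v_side)
  case call_inv =>
    v_inv
  case pre_1065b3 =>
    -- INTERNALREAD'S PRECONDITION. The environment: only the return address was pushed since `v`
    have hs : Mem.SameExcept [⟨(e.reg .rsp).toNat - 224, (e.reg .rsp).toNat - 40⟩] v.mem s_1065b3.mem := by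
      rw [w_mem]
      u_same
    have henv' : Env H rest frames F R s_1065b3 := by
      refine bi2_env_at_call henv hfr.inv hfr.ok hs (by omega) (by omega) ?_ ?_ ?_
      · rw [w_rsp]
        u_omega
      · rw [w_rsp]
        u_omega
      · rw [w_rsp]
        u_omega
    -- the buffer is `pv.Buf[0]`: one byte at `pv + 88`
    have hpl : H.Live F.pv 24936 := hfr.ok.pv_live
    have hbl : LiveIn (H.liveObjs ++ rest) frames (GifFilePrivateType.Buf_at F.pv 0) 1 :=
      bufLive hpl rest frames 0 1 (by omega)
    simp only [gfield] at hbl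
    have e_rsi : (s_1065b3.reg .rsi).toNat = F.pv + 88 := by
      rw [w_rsi]
      exact hrsi
    have hbuf : BufOK H rest frames F R (s_1065b3.reg .rsi).toNat 1 := by
      rw [e_rsi]
      refine ⟨?_, ?_, ?_, by omega⟩
      · exact hbl
      · apply Loose.pvBody
        right
        simp only
        omega
      · apply HeapWin.pv hfr.inv.heap hfr.ok.owns
        · simp only
          omega
        · simp only
          omega
    -- the clauses: `Env`, `rdi = gif`, `edx = 1`, `1 ≤ 1`, `1 < 2 ^ 31`, `BufOK`
    refine ⟨henv', ?_, ?_, by decide, by decide, hbuf⟩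
    · rw [w_rdi]
      exact hrdi
    · rw [w_rdx]
      decide
  -- 0x1065b8 (ret5): INTERNALREAD HAS RETURNED. Its post: `k` bytes delivered
  obtain ⟨k, hk1, hk2, hk3, hk4, hk5, hback⟩ : ReadPost H rest frames F R 1 s_1065b3 s_1065b3r := w_post
  -- the reader at InternalRead's entry is the entry's: only the return address was pushed
  have hs0 : Mem.SameExcept [⟨(e.reg .rsp).toNat - 224, (e.reg .rsp).toNat - 40⟩] v.mem s_1065b3.mem := by
    rw [w_mem_1065b3]
    u_same
  have hrem0 : rem R s_1065b3.mem = rem R e.mem := by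
    rw [← hrem_eq]
    apply rem_sameExcept hs0 (by omega)
    intro w hw
    have e := List.mem_singleton.mp hw
    rw [e]
    simp only
    omega
  have e_top : (s_1065b3.reg .rsp).toNat + 8 = (e.reg .rsp).toNat - 40 := by
    rw [w_rsp_1065b3]
    u_omega
  -- the callee's footprint in terms of `v` (`w_same : SameExcept […] v.mem s_1065b3r.mem`)
  v_after_call w_rsp_1065b3 w_mem_1065b3
  simp only [w_rsi_1065b3] at w_same
  -- THE SLOTS AND THE RETURN ADDRESS, over the pushed return address (first step) and through InternalRead's footprint
  have hp14 : s_1065b3.mem.readLE (e.reg .rsp - 8) 8 = (e.reg .r14).toNat := by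
    rw [w_mem_1065b3]
    u_frame k_r14
  rw [w_mem_1065b3] at hp14
  have hs14 : s_1065b3r.mem.readLE (e.reg .rsp - 8) 8 = (e.reg .r14).toNat := by u_frame hp14
  have hp13 : s_1065b3.mem.readLE (e.reg .rsp - 16) 8 = (e.reg .r13).toNat := by
    rw [w_mem_1065b3]
    u_frame k_r13
  rw [w_mem_1065b3] at hp13
  have hs13 : s_1065b3r.mem.readLE (e.reg .rsp - 16) 8 = (e.reg .r13).toNat := by u_frame hp13
  have hp12 : s_1065b3.mem.readLE (e.reg .rsp - 24) 8 = (e.reg .r12).toNat := by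
    rw [w_mem_1065b3]
    u_frame k_r12
  rw [w_mem_1065b3] at hp12
  have hs12 : s_1065b3r.mem.readLE (e.reg .rsp - 24) 8 = (e.reg .r12).toNat := by u_frame hp12
  have hpbp : s_1065b3.mem.readLE (e.reg .rsp - 32) 8 = (e.reg .rbp).toNat := by
    rw [w_mem_1065b3]
    u_frame k_rbp
  rw [w_mem_1065b3] at hpbp
  have hsbp : s_1065b3r.mem.readLE (e.reg .rsp - 32) 8 = (e.reg .rbp).toNat := by u_frame hpbp
  have hpbx : s_1065b3.mem.readLE (e.reg .rsp - 40) 8 = (e.reg .rbx).toNat := by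
    rw [w_mem_1065b3]
    u_frame k_rbx
  rw [w_mem_1065b3] at hpbx
  have hsbx : s_1065b3r.mem.readLE (e.reg .rsp - 40) 8 = (e.reg .rbx).toNat := by u_frame hpbx
  have hpra : UInt64.ofNat (s_1065b3.mem.readLE (e.reg .rsp) 8) = ret := by
    rw [w_mem_1065b3]
    u_frame k_ra
  rw [w_mem_1065b3] at hpra
  have hsra : UInt64.ofNat (s_1065b3r.mem.readLE (e.reg .rsp) 8) = ret := by u_frame hpra
  -- the footprint since the entry: InternalRead's windows lie inside the function's
  have hsame1 : Mem.SameExcept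
    [⟨(e.reg .rsp).toNat - 224, (e.reg .rsp).toNat⟩,
     ⟨F.pv + 88, F.pv + 344⟩,
     ⟨(e.reg .rdx).toNat, (e.reg .rdx).toNat + 1⟩,
     ⟨F.gif + 96, F.gif + 100⟩,
     ⟨R.cur, R.cur + 8⟩] e.mem s_1065b3r.mem := by u_same
  -- the heap's invariant comes back with the clean stack at the callee's `rsp + 8` = the body's `rsp`
  have hinv1 : HeapInv H rest frames ((e.reg .rsp).toNat - 40) s_1065b3r.mem := by
    rw [← e_top]
    exact hback.inv
  -- THE EXIT ASSERTION: `Frame` at `ret5` …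
  have hfr1 : DGifBufferedInput.Frame Gif.L.DGifBufferedInput.ret5 H rest frames F R u₀ e ret s_1065b3r := {
    entry := hfr.entry
    pre := hfr.pre
    next_above := hfr.next_above
    rip := w_rip
    rsp := w_rsp
    r15 := (w_kept.get .r15 rfl).trans hfr.r15
    slot_r14 := hs14
    slot_r13 := hs13
    slot_r12 := hs12
    slot_rbp := hsbp
    slot_rbx := hsbx
    slot_ra := hsra
    inv := hinv1
    ok := hback.ok
    rem := by
      rw [← hrem0]
      exact hback.rem
    same := hsame1
    code := w_code
    abi := w_inv
  }
  -- … the arguments in their registers, the count in `eax`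
  refine ReachVia.done ?_
  exact {
    body := {
      frame := hfr1
      r13 := (w_kept.get .r13 rfl).trans c_r13
      rbx := (w_kept.get .rbx rfl).trans c_rbx
      r12 := (w_kept.get .r12 rfl).trans c_r12
    }
    count := by
      rw [hk4]
      exact hk1
    adv := by
      intro h1
      rw [hk4] at h1
      rw [hk5, hrem0]
      rw [hrem0] at hk2
      omega
  }

/-- **`test dl, dl` after `movzx edx, BYTE PTR [m]`**: the low byte of the zero-extended byte `n` is `n % 256` (the branch fact of
the `jne` at 1065E4H speaks of this term). -/
theorem bi2_low_byte (n : Nat) : (BitVec.setWidth 8 (BitVec.zeroExtend 32 (BitVec.ofNat 8 n))).toNat = n % 256 := by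
  simp only [BitVec.toNat_setWidth, BitVec.zeroExtend, BitVec.toNat_ofNat]
  omega

/-- **1065B8H (ret5) … 10659DH / 1065FEH** (dgif_lib.c:1123-1134): `mov ebp, eax ; cmp eax, 1`; not 1: the checked store of
`gif.Error = 102`, `ebp = 0`: `Done`; 1: the checked load of `Buf[0]`; 0: the checked store of `gif.Error = 112`, `ebp = 0`: `Done`;
else `AfterLen`. -/
theorem bi2_seg_tail (Lay : Layout) (hLay : Lay.hi = 0x1000000) (μ : Microarch) (hμ : UserX.MicroOK μ) (u₀ : State)
    (hcode : HasCodeNat Lay u₀ Gif.L.DGifBufferedInput.entry Gif.Code.code_DGifBufferedInput.nat Gif.L.DGifBufferedInput.size)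
    (H : Heap) (rest : List Obj) (frames : List (Nat × FrameLayout)) (F : Forest) (R : Rd) (e : State) (ret : Word)
    (h_asan_load1_noabort : Asan.SmallCheck Lay μ ProgX.Base.WayInv (ProgX.Base.CodeOK u₀) [.rax, .rdx] 1
      ProgX.Base.L.__asan_load1_noabort.entry)
    (h_asan_store4_noabort : Asan.SmallCheck Lay μ ProgX.Base.WayInv (ProgX.Base.CodeOK u₀) [.rax, .rcx, .rdx] 4
      ProgX.Base.L.__asan_store4_noabort.entry)
    (v : State) (hat : bi2_AtRet5 H rest frames F R u₀ e ret v) :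
    ReachVia Lay μ ProgX.Base.WayInv v
      (fun w => DGifBufferedInput.Done H rest frames F R u₀ e ret w ∨ DGifBufferedInput.AfterLen H rest frames F R u₀ e ret w) := by
  -- THE PRELUDE: the entry assertion, as in `bi2_seg_call`
  obtain ⟨hbody, hcount, hadv⟩ := hat
  obtain ⟨hfr, c_r13, c_rbx, c_r12⟩ := hbody
  have he := hfr.entry
  v_entry he
  obtain ⟨henv, hrdi, hrsi, hout⟩ := hfr.pre
  have w_rip := hfr.rip
  have c_rsp : v.reg .rsp = e.reg .rsp - 40 := hfr.rsp
  -- `eax` as a variable `z` (the branch fact of `cmp eax, 1` speaks of it)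
  obtain ⟨z, c_rax⟩ : ∃ z, v.reg .rax = z := ⟨_, rfl⟩
  rw [c_rax] at hcount hadv
  have w_kept : RegsKept [.rsp] v v := RegsKept.refl _ _
  have w_eq : Mem.EqOn ProgX.Base.L.textLo ProgX.Base.L.textHi u₀.mem v.mem := ProgX.Base.conv_code_eqOn hfr.code
  have hdf := (show abiInv _ from hfr.abi).1
  have hmx := (show abiInv _ from hfr.abi).2
  have hsse := ProgX.Base.sseOK_of_abiInv hfr.abi
  have k_r14 : v.mem.readLE (e.reg .rsp - 8) 8 = (e.reg .r14).toNat := hfr.slot_r14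
  have k_r13 : v.mem.readLE (e.reg .rsp - 16) 8 = (e.reg .r13).toNat := hfr.slot_r13
  have k_r12 : v.mem.readLE (e.reg .rsp - 24) 8 = (e.reg .r12).toNat := hfr.slot_r12
  have k_rbp : v.mem.readLE (e.reg .rsp - 32) 8 = (e.reg .rbp).toNat := hfr.slot_rbp
  have k_rbx : v.mem.readLE (e.reg .rsp - 40) 8 = (e.reg .rbx).toNat := hfr.slot_rbx
  have k_ra : UInt64.ofNat (v.mem.readLE (e.reg .rsp) 8) = ret := hfr.slot_ra
  have hsame : Mem.SameExcept
    [⟨(e.reg .rsp).toNat - 224, (e.reg .rsp).toNat⟩,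
     ⟨F.pv + 88, F.pv + 344⟩,
     ⟨(e.reg .rdx).toNat, (e.reg .rdx).toNat + 1⟩,
     ⟨F.gif + 96, F.gif + 100⟩,
     ⟨R.cur, R.cur + 8⟩] e.mem v.mem := hfr.same
  -- where the cursor, gif and pv are, as numbers
  have hcur := henv.ctx.cursor_range henv.heap.inv.shadow
  have hgin := henv.ok.owns.inside henv.heap.inv.heap (o := (F.gif, 120)) List.mem_cons_self
  have hpin := henv.ok.owns.inside henv.heap.inv.heap (o := (F.pv, 24936)) (List.mem_cons_of_mem _ List.mem_cons_self)
  have hbase := henv.heap.base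
  simp only at hgin hpin
  rw [hbase] at hgin hpin
  have hg1 := hgin.1
  have hg2 := hgin.2.2.2.2
  have hp1 := hpin.1
  have hp2 := hpin.2.2.2.2
  clear hgin hpin
  -- gif is live, and `Buf[0]` is a byte of `pv.Buf`: what the three check goals ask
  have hgl : LiveIn (H.liveObjs ++ rest) frames F.gif 120 :=
    hfr.ok.gif_live.liveIn rest _ (Nat.le_refl _) (Nat.le_refl _)
  have hbl : LiveIn (H.liveObjs ++ rest) frames (GifFilePrivateType.Buf_at F.pv 0) 1 :=
    bufLive hfr.ok.pv_live rest frames 0 1 (by omega)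
  simp only [gfield] at hbl
  -- THE WALK, all arms, to the epilogue's first instruction or to the second read
  u_walk hcode [hμ.vendor] until [Gif.L.DGifBufferedInput.at_10659d, Gif.L.DGifBufferedInput.at_1065fe]
    span [ProgX.Base.L.textLo, ProgX.Base.L.textHi] side (v_side)
  case check_1065da =>
    -- dgif_lib.c:1131 the load of `Buf[0]`: 1 byte inside `pv.Buf`
    have hun : ShadowUntouched v.mem s_1065da.mem := by v_untouched
    exact hbl.accSmall hfr.inv.shadow hun _ 1 (by decide) (by u_omega) (by u_omega)
  case check_1065ea =>
    -- dgif_lib.c:1132 the store of `gif.Error`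
    have hun : ShadowUntouched v.mem s_1065ea.mem := by v_untouched
    exact hgl.accSmall hfr.inv.shadow hun _ 4 (by decide) (by u_omega) (by u_omega)
  case check_1065c3 =>
    -- dgif_lib.c:1124 the store of `gif.Error`
    have hun : ShadowUntouched v.mem s_1065c3.mem := by v_untouched
    exact hgl.accSmall hfr.inv.shadow hun _ 4 (by decide) (by u_omega) (by u_omega)
  · -- 0x1065fe FROM 0x1065e4: one byte was read, `Buf[0] ≠ 0`: `AfterLen`
    -- the length byte `Buf[0]`, as a number `n < 256`
    have e_buf : v.mem.readLE (e.reg .rsi) 1 = rd v.mem (F.pv + 88) 1 := rd_eq_readLE v.mem (e.reg .rsi) (F.pv + 88) 1 hrsi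
    rw [e_buf] at hbr_1065e4 w_rdx
    have hlt : rd v.mem (F.pv + 88) 1 < 2 ^ (8 * 1) := rd_lt v.mem (F.pv + 88) 1
    rw [bi2_low_byte] at hbr_1065e4
    -- the branch fact of `cmp eax, 1 ; je`: `eax = 1`
    have hz : z.toNat = 1 := by
      rw [toNat_part32] at hbr_1065bd
      have e1 : (1 : Nat) % 2 ^ Width.w32.bits = 1 := by decide
      rw [e1] at hbr_1065bd
      omega
    -- the one store since `v`: the check call's return address (stack)
    obtain ⟨hinvB, hokB, hremB⟩ := store_stack hfr.inv hfr.ok ⟨hcur.1, hcur.2.1⟩ (e.reg .rsp - 48) 8 1074655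
      (by u_omega) (by u_omega)
    rw [← w_mem] at hinvB hokB hremB
    have hremF : rem R s_1065e4.mem = rem R v.mem := hremB
    have e_len : rd s_1065e4.mem (F.pv + 88) 1 = rd v.mem (F.pv + 88) 1 := by
      rw [w_mem]
      exact rd_writeLE_disjoint _ _ _ _ _ _ (by u_omega) (by omega) (by u_omega)
    -- THE EXIT ASSERTION: `Frame` at 0x1065fe …
    have hfr1 : DGifBufferedInput.Frame Gif.L.DGifBufferedInput.at_1065fe H rest frames F R u₀ e ret s_1065e4 := {
      entry := hfr.entry
      pre := hfr.pre
      next_above := hfr.next_above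
      rip := w_rip
      rsp := w_rsp
      r15 := (w_kept.get .r15 rfl).trans hfr.r15
      slot_r14 := by
        rw [w_mem]
        u_frame k_r14
      slot_r13 := by
        rw [w_mem]
        u_frame k_r13
      slot_r12 := by
        rw [w_mem]
        u_frame k_r12
      slot_rbp := by
        rw [w_mem]
        u_frame k_rbp
      slot_rbx := by
        rw [w_mem]
        u_frame k_rbx
      slot_ra := by
        rw [w_mem]
        u_frame k_ra
      inv := hinvB
      ok := hokB
      rem := by
        rw [hremF]
        exact hfr.rem
      same := by
        rw [w_mem]
        u_same
      code := ProgX.Base.conv_code_in w_eq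
      abi := by
        refine ProgX.Base.abiInv_of ?_ ?_
        · rw [w_flags, X86.User.df_setStatus]
          exact w_df_1065da
        · rw [w_mxcsr]
          exact hmx
    }
    -- … and `AfterLen`: `rdx = Buf[0]`, `1 ≤ Buf[0] ≤ 255`, `rbp = 1`, one byte consumed
    refine ReachVia.done (Or.inr ?_)
    exact {
      body := {
        frame := hfr1
        r13 := (w_kept.get .r13 rfl).trans c_r13
        rbx := (w_kept.get .rbx rfl).trans c_rbx
        r12 := (w_kept.get .r12 rfl).trans c_r12
      }
      rdx := by
        rw [w_rdx, movzx8_toNat, e_len]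
        omega
      len_pos := by
        rw [e_len]
        omega
      len_le := by
        rw [e_len]
        omega
      rbp := by
        rw [w_rbp, toNat_ofBV32, toNat_part32]
        omega
      rem_eq := by
        rw [hremF]
        exact hadv hz
    }
  · -- 0x10659d FROM 0x1065fc: `Buf[0] = 0`, `gif.Error = D_GIF_ERR_IMAGE_DEFECT` stored, ebp = 0
    -- the two stores since `v`: the check call's return address (stack), then `gif.Error`
    obtain ⟨hinvA, hokA, hremA⟩ := store_stack hfr.inv hfr.ok ⟨hcur.1, hcur.2.1⟩ (e.reg .rsp - 48) 8 1074671
      (by u_omega) (by u_omega)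
    obtain ⟨hinvB, hokB, hremB⟩ := store_gif hinvA hokA ⟨hcur.1, hcur.2.1⟩ hbase (e.reg .rdi + 96) 4 112
      (Or.inr (Or.inr (by u_omega)))
    rw [← w_mem] at hinvB hokB hremB
    have hremF : rem R s_1065fc.mem = rem R v.mem := hremB.trans hremA
    have e_rbp : (s_1065fc.reg .rbp).toNat = 0 := by
      rw [w_rbp]
      decide
    -- THE EXIT ASSERTION: `Frame` at 0x10659d …
    have hfr1 : DGifBufferedInput.Frame Gif.L.DGifBufferedInput.at_10659d H rest frames F R u₀ e ret s_1065fc := {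
      entry := hfr.entry
      pre := hfr.pre
      next_above := hfr.next_above
      rip := w_rip
      rsp := w_rsp
      r15 := (w_kept.get .r15 rfl).trans hfr.r15
      slot_r14 := by
        rw [w_mem]
        u_frame k_r14
      slot_r13 := by
        rw [w_mem]
        u_frame k_r13
      slot_r12 := by
        rw [w_mem]
        u_frame k_r12
      slot_rbp := by
        rw [w_mem]
        u_frame k_rbp
      slot_rbx := by
        rw [w_mem]
        u_frame k_rbx
      slot_ra := by
        rw [w_mem]
        u_frame k_ra
      inv := hinvB
      ok := hokB
      rem := by
        rw [hremF]
        exact hfr.rem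
      same := by
        rw [w_mem]
        u_same
      code := ProgX.Base.conv_code_in w_eq
      abi := by
        refine ProgX.Base.abiInv_of ?_ ?_
        · rw [w_flags]
          exact w_df_1065ea
        · rw [w_mxcsr]
          exact hmx
    }
    -- … and the result: GIF_ERROR
    refine ReachVia.done (Or.inl ?_)
    exact {
      frame := hfr1
      res := Or.inr e_rbp
      ok1 := by
        intro h1
        rw [e_rbp] at h1
        exact absurd h1 (by decide)
    }
  · -- 0x10659d FROM 0x1065d5: no byte was read, `gif.Error = D_GIF_ERR_READ_FAILED` stored, ebp = 0
    -- the two stores since `v`: the check call's return address (stack), then `gif.Error`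
    obtain ⟨hinvA, hokA, hremA⟩ := store_stack hfr.inv hfr.ok ⟨hcur.1, hcur.2.1⟩ (e.reg .rsp - 48) 8 1074632
      (by u_omega) (by u_omega)
    obtain ⟨hinvB, hokB, hremB⟩ := store_gif hinvA hokA ⟨hcur.1, hcur.2.1⟩ hbase (e.reg .rdi + 96) 4 102
      (Or.inr (Or.inr (by u_omega)))
    rw [← w_mem] at hinvB hokB hremB
    have hremF : rem R s_1065d5.mem = rem R v.mem := hremB.trans hremA
    have e_rbp : (s_1065d5.reg .rbp).toNat = 0 := by
      rw [w_rbp]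
      decide
    -- THE EXIT ASSERTION: `Frame` at 0x10659d …
    have hfr1 : DGifBufferedInput.Frame Gif.L.DGifBufferedInput.at_10659d H rest frames F R u₀ e ret s_1065d5 := {
      entry := hfr.entry
      pre := hfr.pre
      next_above := hfr.next_above
      rip := w_rip
      rsp := w_rsp
      r15 := (w_kept.get .r15 rfl).trans hfr.r15
      slot_r14 := by
        rw [w_mem]
        u_frame k_r14
      slot_r13 := by
        rw [w_mem]
        u_frame k_r13
      slot_r12 := by
        rw [w_mem]
        u_frame k_r12
      slot_rbp := by
        rw [w_mem]
        u_frame k_rbp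
      slot_rbx := by
        rw [w_mem]
        u_frame k_rbx
      slot_ra := by
        rw [w_mem]
        u_frame k_ra
      inv := hinvB
      ok := hokB
      rem := by
        rw [hremF]
        exact hfr.rem
      same := by
        rw [w_mem]
        u_same
      code := ProgX.Base.conv_code_in w_eq
      abi := by
        refine ProgX.Base.abiInv_of ?_ ?_
        · rw [w_flags]
          exact w_df_1065c3
        · rw [w_mxcsr]
          exact hmx
    }
    -- … and the result: GIF_ERROR
    refine ReachVia.done (Or.inl ?_)
    exact {
      frame := hfr1
      res := Or.inr e_rbp
      ok1 := by
        intro h1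
        rw [e_rbp] at h1
        exact absurd h1 (by decide)
    }

end Gif.Spec.DGifBufferedInput_2
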